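-- pv_equiv track=rewrite | github.com/bboodd/algorithm | 백준/Gold/11444. 피보나치 수 6/피보나치 수 6.py | reduce_pow
-- ===== SOURCE A (Python) =====
-- p = 1000000007
--
-- def matrix_multiple(a, b):
--     result = [[0 for _ in range(2)] for _ in range(2)]
--
--     for i in range(2):
--         for j in range(2):
--             for k in range(2):
--                 result[i][j] += a[i][k] * b[k][j] % p
--
--     return result
--
-- def reduce_pow(a, b):
--     if b == 1:
--         for i in range(2):
--             for j in range(2):
--                 a[i][j] %= p
--         return a
--
--     reduce = reduce_pow(a, b//2)
--
--     if b % 2 == 0: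
--         return matrix_multiple(reduce, reduce)
--     else:
--         return matrix_multiple(a, matrix_multiple(reduce, reduce))
-- ===== SOURCE B (Python) =====
-- p = 1000000007
--
-- def reduce_pow(a, b):
--     # reduce the 2x2 block of a mod p in place, like A's base case
--     for i in range(2):
--         row = a[i]
--         row[0] %= p
--         row[1] %= p
--     if b == 1:
--         return a
--     # unboxed scalar MSB-first binary exponentiation; the inlined 2x2 products
--     # keep A's asymmetric "x*y % p then sum" grouping, so integers are identical
--     s00, s01 = a[0][0], a[0][1]
--     s10, s11 = a[1][0], a[1][1]
--     r00, r01, r10, r11 = s00, s01, s10, s11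
--     for bit in bin(b)[3:]:
--         r00, r01, r10, r11 = (r00*r00 % p + r01*r10 % p,
--                               r00*r01 % p + r01*r11 % p,
--                               r10*r00 % p + r11*r10 % p,
--                               r10*r01 % p + r11*r11 % p)
--         if bit == '1':
--             r00, r01, r10, r11 = (s00*r00 % p + s01*r10 % p,
--                                   s00*r01 % p + s01*r11 % p,
--                                   s10*r00 % p + s11*r10 % p,
--                                   s10*r01 % p + s11*r11 % p)
--     return [[r00, r01], [r10, r11]]
-- ===== Notes on version B (the rewrite author's own statement) =====
-- stated objective: alternative
-- what changed: Replaces A's top-down recursion over list-of-list matrices with an iterative MSB-first binary exponentiation on four unboxed scalar entries, the 2x2 products written inline with A's asymmetric 'x*y % p then sum' grouping, so every integer is identical; both A and B reduce the 2x2 head of the argument mod p in place.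
import Mathlib
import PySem

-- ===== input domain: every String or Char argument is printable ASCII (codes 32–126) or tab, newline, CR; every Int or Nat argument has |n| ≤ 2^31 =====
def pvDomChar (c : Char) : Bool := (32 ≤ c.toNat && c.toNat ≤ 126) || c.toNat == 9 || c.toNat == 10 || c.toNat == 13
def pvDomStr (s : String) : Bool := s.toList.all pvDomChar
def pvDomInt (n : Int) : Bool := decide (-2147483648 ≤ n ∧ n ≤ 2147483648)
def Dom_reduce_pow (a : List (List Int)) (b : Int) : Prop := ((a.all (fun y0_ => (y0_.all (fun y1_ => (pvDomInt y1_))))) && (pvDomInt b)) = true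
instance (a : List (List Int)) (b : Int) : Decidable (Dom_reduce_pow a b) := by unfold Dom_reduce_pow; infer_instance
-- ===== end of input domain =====

-- B replaces A's top-down recursion on list matrices by an iterative MSB-first binary
-- exponentiation on four unboxed scalar entries with the 2x2 products written inline,
-- keeping A's asymmetric "x*y % p then sum" grouping so all integers agree.
-- Both A and B reduce the 2x2 head of `a` mod p IN PLACE (same side effect);
-- the theorems below are about the return value.

-- ===== PORT A =====
def pvP : Int := 1000000007

-- a[i][k] (every access is in range under Pre_: i,k < 2 and the rows are long enough)
def pvGet (m : List (List Int)) (i k : Nat) : Int := (m.getD i []).getD k 0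

-- literal port of matrix_multiple: result[i][j] = sum over k of a[i][k] * b[k][j] % p (no outer reduction)
def matrix_multiple (a b : List (List Int)) : List (List Int) :=
  (List.range 2).map (fun i => (List.range 2).map (fun j =>
    (List.range 2).foldl (fun acc k => acc + PySem.Int.mod (pvGet a i k * pvGet b k j) pvP) 0))

-- the in-place loop `a[i][j] %= p for i,j in range(2)` (rest of the list unchanged)
def pvModA (a : List (List Int)) : List (List Int) :=
  a.mapIdx (fun i row => if i < 2 then row.mapIdx (fun j x => if j < 2 then PySem.Int.mod x pvP else x) else row)

-- A's recursion, with the in-place mutation of `a` threaded as the first component of the state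
-- (the base case mutates the shared list; every outer frame's `a` is that mutated list).
-- n = 0 (Python: infinite recursion, RecursionError) is excluded by Pre_ and returns a dummy here.
def reduce_pow_go (a : List (List Int)) (n : Nat) : List (List Int) × List (List Int) :=
  if n = 1 then
    let a' := pvModA a
    (a', a')
  else if _h : 2 ≤ n then
    let res := reduce_pow_go a (n / 2)
    if n % 2 = 0 then (res.1, matrix_multiple res.2 res.2)
    else (res.1, matrix_multiple res.1 (matrix_multiple res.2 res.2))
  else (a, a)
termination_by n
decreasing_by exact Nat.div_lt_self (by omega) (by omega)

def reduce_pow (a : List (List Int)) (b : Int) : List (List Int) :=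
  (reduce_pow_go a b.toNat).2

-- ===== PORT B =====
-- `row[0] %= p; row[1] %= p` on one row
def pvRowMod (r : List Int) : List Int :=
  (r.set 0 (PySem.Int.mod (r.getD 0 0) 1000000007)).set 1 (PySem.Int.mod (r.getD 1 0) 1000000007)

-- the for-loop over the first two rows
def pvHeadMod (a : List (List Int)) : List (List Int) :=
  (a.set 0 (pvRowMod (a.getD 0 []))).set 1 (pvRowMod (a.getD 1 []))

-- one iteration of B's loop body: square the accumulator, then (if the bit is set)
-- left-multiply by the reduced base s, all on unboxed scalars
def pvStep (s00 s01 s10 s11 : Int) (r : Int × Int × Int × Int) (bit : Char) :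
    Int × Int × Int × Int :=
  let (r00, r01, r10, r11) := r
  let t00 := PySem.Int.mod (r00*r00) pvP + PySem.Int.mod (r01*r10) pvP
  let t01 := PySem.Int.mod (r00*r01) pvP + PySem.Int.mod (r01*r11) pvP
  let t10 := PySem.Int.mod (r10*r00) pvP + PySem.Int.mod (r11*r10) pvP
  let t11 := PySem.Int.mod (r10*r01) pvP + PySem.Int.mod (r11*r11) pvP
  if bit = '1' then
    (PySem.Int.mod (s00*t00) pvP + PySem.Int.mod (s01*t10) pvP,
     PySem.Int.mod (s00*t01) pvP + PySem.Int.mod (s01*t11) pvP,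
     PySem.Int.mod (s10*t00) pvP + PySem.Int.mod (s11*t10) pvP,
     PySem.Int.mod (s10*t01) pvP + PySem.Int.mod (s11*t11) pvP)
  else (t00, t01, t10, t11)

def reduce_pow_alt (a : List (List Int)) (b : Int) : List (List Int) :=
  let a' := pvHeadMod a
  if b = 1 then a'
  else
    let s00 := (a'.getD 0 []).getD 0 0
    let s01 := (a'.getD 0 []).getD 1 0
    let s10 := (a'.getD 1 []).getD 0 0
    let s11 := (a'.getD 1 []).getD 1 0
    let r := ((PySem.Int.toBinChars0b b).drop 3).foldl (pvStep s00 s01 s10 s11)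
      (s00, s01, s10, s11)
    [[r.1, r.2.1], [r.2.2.1, r.2.2.2]]

-- ===== PRECONDITION & SPEC =====
-- Pre_ excludes exactly the crashes of A: b ≤ 0 (A's recursion never reaches the base case:
-- RecursionError) and matrices without a full 2x2 top-left block (IndexError in the mod loop).
def Pre_reduce_pow (a : List (List Int)) (b : Int) : Prop :=
  2 ≤ a.length ∧ 2 ≤ (a.getD 0 []).length ∧ 2 ≤ (a.getD 1 []).length ∧ 1 ≤ b

instance (a : List (List Int)) (b : Int) : Decidable (Pre_reduce_pow a b) := by
  unfold Pre_reduce_pow; infer_instance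

def pvWitness_reduce_pow : List (List Int) × Int := ([[1, 1], [1, 0]], 11)

def Spec_reduce_pow (a : List (List Int)) (b : Int) (out : List (List Int)) : Prop := out = reduce_pow_alt a b
instance (a : List (List Int)) (b : Int) (out : List (List Int)) : Decidable (Spec_reduce_pow a b out) := by unfold Spec_reduce_pow; infer_instance

-- ===== CLAIM (what is proved, stated in full; the proofs are below) =====
def Claim_equal_reduce_pow : Prop := ∀ (a : List (List Int)) (b : Int), Dom_reduce_pow a b → Pre_reduce_pow a b → Spec_reduce_pow a b (reduce_pow a b)

-- ===== LEMMAS AND PROOFS =====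

-- fuel monotonicity of Nat.toDigitsCore: any fuel > n yields the same digit list
theorem pv_toDigitsCore_fuel (b : Nat) (hb : 2 ≤ b) :
    ∀ f₁ f₂ n ds, n < f₁ → n < f₂ →
      Nat.toDigitsCore b f₁ n ds = Nat.toDigitsCore b f₂ n ds := by
  intro f₁
  induction f₁ with
  | zero => intro f₂ n ds h1 h2; omega
  | succ f ih =>
    intro f₂ n ds h1 h2
    cases f₂ with
    | zero => omega
    | succ g =>
      simp only [Nat.toDigitsCore]
      by_cases hz : n / b = 0
      · simp [hz]
      · simp only [hz, if_false]
        have hn0 : 0 < n := by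
          rcases Nat.eq_zero_or_pos n with h | h
          · exact absurd (by simp [h]) hz
          · exact h
        have hd : n / b < n := Nat.div_lt_self hn0 (by omega)
        exact ih g (n / b) _ (by omega) (by omega)

-- accumulator law for Nat.toDigitsCore
theorem pv_toDigitsCore_acc (b : Nat) :
    ∀ f n ds, Nat.toDigitsCore b f n ds = Nat.toDigitsCore b f n [] ++ ds := by
  intro f
  induction f with
  | zero => intro n ds; simp [Nat.toDigitsCore]
  | succ f ih =>
    intro n ds
    simp only [Nat.toDigitsCore]
    by_cases hz : n / b = 0
    · simp [hz]
    · simp only [hz, if_false]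
      rw [ih (n / b) (Nat.digitChar (n % b) :: ds), ih (n / b) [Nat.digitChar (n % b)]]
      simp

theorem pv_toDigits_ne_nil (b n : Nat) : Nat.toDigits b n ≠ [] := by
  unfold Nat.toDigits
  simp only [Nat.toDigitsCore]
  by_cases hz : n / b = 0
  · simp [hz]
  · simp only [hz, if_false]
    rw [pv_toDigitsCore_acc]
    simp

-- recurrence: for n ≥ b ≥ 2, digits of n = digits of n / b, then the last digit
theorem pv_toDigits_rec (b n : Nat) (hb : 2 ≤ b) (hn : b ≤ n) :
    Nat.toDigits b n = Nat.toDigits b (n / b) ++ [Nat.digitChar (n % b)] := by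
  have hz : n / b ≠ 0 := by
    have := (Nat.one_le_div_iff (by omega : 0 < b)).mpr hn
    omega
  unfold Nat.toDigits
  conv_lhs => rw [Nat.toDigitsCore]
  simp only [hz, if_false]
  rw [pv_toDigitsCore_acc]
  congr 1
  have hd : n / b < n := Nat.div_lt_self (by omega) (by omega)
  exact pv_toDigitsCore_fuel b hb n (n / b + 1) (n / b) [] (by omega) (by omega)

-- the threaded state is always the mod-reduced matrix
theorem pv_go_fst (a : List (List Int)) : ∀ n : Nat, 1 ≤ n → (reduce_pow_go a n).1 = pvModA a := by
  intro n
  induction n using Nat.strong_induction_on with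
  | _ n ih =>
    intro hn
    rw [reduce_pow_go]
    by_cases h1 : n = 1
    · simp [h1]
    · have h2 : 2 ≤ n := by omega
      have hd : n / 2 < n := Nat.div_lt_self (by omega) (by omega)
      have hfst := ih (n / 2) hd (by omega)
      simp only [if_neg h1, dif_pos h2]
      rcases Nat.mod_two_eq_zero_or_one n with hp | hp <;> simp [hp, hfst]

-- A's recursion equals an MSB-first fold over the binary digits below the leading one,
-- on list matrices (the intermediate shape between the two ports)
theorem pv_go_eq_fold (a : List (List Int)) : ∀ n : Nat, 1 ≤ n →
    (reduce_pow_go a n).2 =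
      ((Nat.toDigits 2 n).drop 1).foldl
        (fun result bit =>
          let result := matrix_multiple result result
          if bit = '1' then matrix_multiple (pvModA a) result else result)
        (pvModA a) := by
  intro n
  induction n using Nat.strong_induction_on with
  | _ n ih =>
    intro hn
    by_cases h1 : n = 1
    · subst h1
      rw [reduce_pow_go]
      have ht : Nat.toDigits 2 1 = ['1'] := rfl
      simp [ht]
    · have h2 : 2 ≤ n := by omega
      have hd : n / 2 < n := Nat.div_lt_self (by omega) (by omega)
      have hne := pv_toDigits_ne_nil 2 (n / 2)
      have hlen : 1 ≤ (Nat.toDigits 2 (n / 2)).length := by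
        cases hL : Nat.toDigits 2 (n / 2)
        · exact absurd hL hne
        · simp
      rw [pv_toDigits_rec 2 n (le_refl 2) h2,
          List.drop_append_of_le_length hlen, List.foldl_append,
          ← ih (n / 2) hd (by omega)]
      have hfst := pv_go_fst a (n / 2) (by omega)
      rw [reduce_pow_go]
      simp only [if_neg h1, dif_pos h2]
      rcases Nat.mod_two_eq_zero_or_one n with hp | hp <;>
        simp [hp, hfst, Nat.digitChar]

-- matrix_multiple as an explicit 2x2 literal over pvGet entries
theorem pv_mm_lit (X Y : List (List Int)) :
    matrix_multiple X Y =
      [[PySem.Int.mod (pvGet X 0 0 * pvGet Y 0 0) pvP + PySem.Int.mod (pvGet X 0 1 * pvGet Y 1 0) pvP,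
        PySem.Int.mod (pvGet X 0 0 * pvGet Y 0 1) pvP + PySem.Int.mod (pvGet X 0 1 * pvGet Y 1 1) pvP],
       [PySem.Int.mod (pvGet X 1 0 * pvGet Y 0 0) pvP + PySem.Int.mod (pvGet X 1 1 * pvGet Y 1 0) pvP,
        PySem.Int.mod (pvGet X 1 0 * pvGet Y 0 1) pvP + PySem.Int.mod (pvGet X 1 1 * pvGet Y 1 1) pvP]] := by
  simp [matrix_multiple, List.range_succ]

-- bridge: the list-matrix fold and B's scalar fold run in lockstep, and after at
-- least one step the list is exactly the 2x2 literal of the scalars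
theorem pv_bridge (S : List (List Int)) (s00 s01 s10 s11 : Int)
    (hS0 : pvGet S 0 0 = s00) (hS1 : pvGet S 0 1 = s01)
    (hS2 : pvGet S 1 0 = s10) (hS3 : pvGet S 1 1 = s11) :
    ∀ (bits : List Char) (L : List (List Int)) (r00 r01 r10 r11 : Int),
      pvGet L 0 0 = r00 → pvGet L 0 1 = r01 → pvGet L 1 0 = r10 → pvGet L 1 1 = r11 →
      bits ≠ [] →
      bits.foldl
        (fun result bit =>
          let result := matrix_multiple result result
          if bit = '1' then matrix_multiple S result else result) L =
      (let q := bits.foldl (pvStep s00 s01 s10 s11) (r00, r01, r10, r11)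
       [[q.1, q.2.1], [q.2.2.1, q.2.2.2]]) := by
  intro bits
  induction bits with
  | nil => intro _ _ _ _ _ _ _ _ _ hne; exact absurd rfl hne
  | cons c rest ih =>
    intro L r00 r01 r10 r11 h0 h1 h2 h3 _
    simp only [List.foldl_cons]
    set L2 := matrix_multiple L L with hL2
    set L' := (if c = '1' then matrix_multiple S L2 else L2) with hL'
    have hlit : L' = (let q := pvStep s00 s01 s10 s11 (r00, r01, r10, r11) c
        [[q.1, q.2.1], [q.2.2.1, q.2.2.2]]) := by
      by_cases hc : c = '1' <;>
        simp [hL', hL2, hc, pv_mm_lit, pvStep, h0, h1, h2, h3, hS0, hS1, hS2, hS3] <;>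
        simp [pvGet]
    rcases Decidable.em (rest = []) with hr | hr
    · subst hr; simpa using hlit
    · exact (ih L' _ _ _ _ (by rw [hlit]; rfl) (by rw [hlit]; rfl) (by rw [hlit]; rfl)
        (by rw [hlit]; rfl) hr).trans rfl

-- one row: `row[0] %= p; row[1] %= p` equals the mapIdx reduction of the first two entries
theorem pv_rowmod_eq (r : List Int) (hr : 2 ≤ r.length) :
    pvRowMod r = r.mapIdx (fun j x => if j < 2 then PySem.Int.mod x pvP else x) := by
  have hg0 : r[0]? = some (r[0]'(by omega)) := List.getElem?_eq_getElem (by omega)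
  have hg1 : r[1]? = some (r[1]'(by omega)) := List.getElem?_eq_getElem (by omega)
  apply List.ext_getElem (by simp [pvRowMod])
  intro j h₁ h₂
  rcases j with _ | _ | j <;>
    simp [pvRowMod, hg0, hg1, pvP]

-- pvHeadMod agrees with pvModA when the 2x2 top-left block exists
theorem pv_headmod_eq (a : List (List Int))
    (ha : 2 ≤ a.length) (h0 : 2 ≤ (a.getD 0 []).length) (h1 : 2 ≤ (a.getD 1 []).length) :
    pvHeadMod a = pvModA a := by
  have hg0 : a[0]? = some (a[0]'(by omega)) := List.getElem?_eq_getElem (by omega)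
  have hg1 : a[1]? = some (a[1]'(by omega)) := List.getElem?_eq_getElem (by omega)
  have hdd0 : a.getD 0 [] = a[0]'(by omega) := by simp [List.getD, hg0]
  have hdd1 : a.getD 1 [] = a[1]'(by omega) := by simp [List.getD, hg1]
  apply List.ext_getElem (by simp [pvHeadMod, pvModA])
  intro i h₁ h₂
  rcases i with _ | _ | i <;>
    simp [pvHeadMod, pvModA, hg0, hg1,
      pv_rowmod_eq _ (hdd0 ▸ h0), pv_rowmod_eq _ (hdd1 ▸ h1)]

-- ===== VERDICT (by name: the statement is the Claim_ definition above) =====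
theorem reduce_pow_spec : Claim_equal_reduce_pow := by
  intro a b _hDom hPre
  obtain ⟨ha, h0, h1, hb1⟩ := hPre
  have hhm := pv_headmod_eq a ha h0 h1
  unfold Spec_reduce_pow reduce_pow reduce_pow_alt
  by_cases hb : b = 1
  · subst hb
    rw [hhm]
    simp [reduce_pow_go]
  · have hb2 : (2 : Int) ≤ b := by omega
    have hneg : ¬ b < 0 := by omega
    have hn2 : 2 ≤ b.toNat := by omega
    have hbits : (Nat.toDigits 2 b.toNat).drop 1 ≠ [] := by
      rw [pv_toDigits_rec 2 b.toNat (le_refl 2) hn2]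
      have hne := pv_toDigits_ne_nil 2 (b.toNat / 2)
      cases hL : Nat.toDigits 2 (b.toNat / 2)
      · exact absurd hL hne
      · simp
    rw [pv_go_eq_fold a b.toNat (by omega)]
    simp only [PySem.Int.toBinChars0b, if_neg hneg, List.drop_succ_cons, if_neg hb, hhm]
    exact pv_bridge (pvModA a) _ _ _ _ rfl rfl rfl rfl
      ((Nat.toDigits 2 b.toNat).drop 1) (pvModA a) _ _ _ _ rfl rfl rfl rfl hbits
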